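-- pv_equiv track=rewrite | github.com/wowonjin/nova_ai_landing | nova-ai/script_runner.py | _sanitize_tabs
-- ===== SOURCE A (Python) =====
-- from typing import Callable, Dict, List
--
-- def _sanitize_tabs(lines: List[str]) -> List[str]:
--     """
--     Only keep insert_text('\\t') when it immediately precedes an insert_equation(...) line.
--     Otherwise replace it with a single space.
--     """
--     out: List[str] = []
--     i = 0
--     while i < len(lines):
--         line = lines[i]
--         if line.strip() == "insert_text('\\t')" or line.strip() == 'insert_text("\\t")':
--             j = i + 1
--             while j < len(lines) and not lines[j].strip():
--                 j += 1
--             if j < len(lines) and lines[j].lstrip().startswith("insert_equation("):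
--                 out.append(line)
--             else:
--                 out.append("insert_space()")
--             i += 1
--             continue
--         out.append(line)
--         i += 1
--     return out
-- ===== SOURCE B (Python) =====
-- from typing import List
--
-- def _sanitize_tabs(lines: List[str]) -> List[str]:
--     """Single reverse pass: a flag remembers whether the nearest non-blank
--     line below starts with insert_equation(."""
--     out: List[str] = []
--     follows_eq = False
--     for line in reversed(lines):
--         s = line.strip()
--         if not s:
--             out.append(line)
--             continue
--         if s == "insert_text('\\t')" or s == 'insert_text("\\t")':
--             out.append(line if follows_eq else "insert_space()")
--         else:
--             out.append(line)
--         follows_eq = line.lstrip().startswith("insert_equation(")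
--     return out[::-1]
-- ===== Notes on version B (the rewrite author's own statement) =====
-- stated objective: alternative
-- what changed: Replaces the forward pass with a per-tab-line forward scan over blank lines by a single reverse pass that maintains a 'nearest non-blank line below is insert_equation(...)' flag, eliminating the lookahead.
import Mathlib
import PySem

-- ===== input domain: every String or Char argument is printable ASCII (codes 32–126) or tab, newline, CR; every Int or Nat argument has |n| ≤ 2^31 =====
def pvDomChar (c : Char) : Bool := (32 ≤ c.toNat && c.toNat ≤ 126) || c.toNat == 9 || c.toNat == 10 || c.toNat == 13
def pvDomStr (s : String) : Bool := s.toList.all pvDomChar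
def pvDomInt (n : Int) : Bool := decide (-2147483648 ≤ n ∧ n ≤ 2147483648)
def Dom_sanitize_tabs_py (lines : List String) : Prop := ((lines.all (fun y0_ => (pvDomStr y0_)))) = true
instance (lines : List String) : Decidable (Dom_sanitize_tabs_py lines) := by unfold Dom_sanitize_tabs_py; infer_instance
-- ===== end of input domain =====

-- B replaces A's per-tab-line forward scan over blank lines by a single reverse pass with a flag (objective: alternative decomposition, no lookahead).

-- ===== PORT A =====
-- inner while loop of A: skip blank lines, then 'j < len(lines) and lines[j].lstrip().startswith("insert_equation(")'
def pyNextEq : List String → Bool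
  | [] => false
  | l :: rest =>
    if PySem.Str.strip l == "" then pyNextEq rest
    else PySem.Str.startswith (PySem.Str.lstrip l) "insert_equation("

def sanitize_tabs_py : List String → List String
  | [] => []
  | line :: rest =>
    if PySem.Str.strip line == "insert_text('\\t')" || PySem.Str.strip line == "insert_text(\"\\t\")" then
      (if pyNextEq rest then line else "insert_space()") :: sanitize_tabs_py rest
    else
      line :: sanitize_tabs_py rest

-- ===== PORT B =====
-- one iteration of B's loop over reversed(lines): state = (follows_eq flag, out list so far)
def altStep (st : Bool × List String) (line : String) : Bool × List String :=
  let s := PySem.Str.strip line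
  if s == "" then (st.1, st.2 ++ [line])
  else
    (PySem.Str.startswith (PySem.Str.lstrip line) "insert_equation(",
     if s == "insert_text('\\t')" || s == "insert_text(\"\\t\")" then
       st.2 ++ [if st.1 then line else "insert_space()"]
     else st.2 ++ [line])

def sanitize_tabs_py_alt (lines : List String) : List String :=
  ((lines.reverse.foldl altStep (false, [])).2).reverse

-- ===== PRECONDITION & SPEC =====
def Spec_sanitize_tabs_py (lines : List String) (out : List String) : Prop := out = sanitize_tabs_py_alt lines
instance (lines : List String) (out : List String) : Decidable (Spec_sanitize_tabs_py lines out) := by unfold Spec_sanitize_tabs_py; infer_instance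

-- ===== CLAIM (what is proved, stated in full; the proofs are below) =====
def Claim_equal_sanitize_tabs_py : Prop := ∀ (lines : List String), Dom_sanitize_tabs_py lines → Spec_sanitize_tabs_py lines (sanitize_tabs_py lines)

-- ===== LEMMAS AND PROOFS =====

-- B's fold over the reversed list, read as a foldr, computes A's result (reversed) together with A's lookahead flag.
theorem altFold_eq (lines : List String) :
    lines.foldr (fun x st => altStep st x) (false, ([] : List String))
      = (pyNextEq lines, (sanitize_tabs_py lines).reverse) := by
  induction lines with
  | nil => rfl
  | cons l rest ih =>
    rw [List.foldr_cons, ih]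
    by_cases hb : PySem.Str.strip l = ""
    · simp [altStep, sanitize_tabs_py, pyNextEq, hb]
    · by_cases ht : (PySem.Str.strip l == "insert_text('\\t')"
          || PySem.Str.strip l == "insert_text(\"\\t\")") = true
      · simp [altStep, sanitize_tabs_py, pyNextEq, hb, ht]
      · simp [altStep, sanitize_tabs_py, pyNextEq, hb, ht]

-- ===== VERDICT (by name: the statement is the Claim_ definition above) =====
theorem sanitize_tabs_py_spec : Claim_equal_sanitize_tabs_py := by
  intro lines _
  unfold Spec_sanitize_tabs_py sanitize_tabs_py_alt
  rw [List.foldl_reverse, altFold_eq]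
  simp
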